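-- pv_equiv track=rewrite | github.com/jerbarnes/sentiment_graphs | baselines/bilstm_crf/utils/utils.py | binary_fn
-- ===== SOURCE A (Python) =====
-- def binary_fn(gold, pred):
--     """
--     if there is any member of gold that overlaps with no member of pred,
--     return 1
--     else
--     return 0
--     """
--     fns = 0
--     for p in gold:
--         fn = True
--         for word in p:
--             for span in pred:
--                 if word in span:
--                     fn = False
--         if fn is True:
--             fns += 1
--     return fns
-- ===== SOURCE B (Python) =====
-- def binary_fn(gold, pred):
--     pred_words = set()
--     for span in pred:
--         pred_words.update(span)
--     return sum(1 for p in gold if pred_words.isdisjoint(p))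
-- ===== Notes on version B (the rewrite author's own statement) =====
-- stated objective: faster
-- what changed: B flattens pred once into a hash set of words and counts gold spans disjoint from it in one pass, instead of A's triple nested loop rescanning every pred span for every word of every gold span.
import Mathlib
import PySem

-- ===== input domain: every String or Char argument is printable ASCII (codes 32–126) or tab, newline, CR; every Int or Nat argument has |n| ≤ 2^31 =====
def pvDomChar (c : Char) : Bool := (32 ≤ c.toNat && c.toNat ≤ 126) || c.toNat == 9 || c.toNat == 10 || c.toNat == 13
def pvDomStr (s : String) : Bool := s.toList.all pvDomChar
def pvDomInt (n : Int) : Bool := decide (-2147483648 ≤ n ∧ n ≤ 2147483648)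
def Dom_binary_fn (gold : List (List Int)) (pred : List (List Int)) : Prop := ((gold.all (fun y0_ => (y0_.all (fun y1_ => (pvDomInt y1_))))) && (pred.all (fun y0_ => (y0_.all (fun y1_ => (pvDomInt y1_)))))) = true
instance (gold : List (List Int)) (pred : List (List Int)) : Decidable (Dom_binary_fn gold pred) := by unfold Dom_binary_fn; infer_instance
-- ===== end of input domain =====

-- B builds the set of all words of pred once and counts gold spans disjoint from it (one pass
-- instead of A's triple nested loop); same return value everywhere.

-- ===== PORT A =====
def binary_fn (gold : List (List Int)) (pred : List (List Int)) : Int :=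
  gold.foldl (fun fns p =>
    let fn : Bool := p.foldl (fun fn word =>
      pred.foldl (fun fn span => if word ∈ span then false else fn) fn) true
    if fn then fns + 1 else fns) 0

-- ===== PORT B =====
def binary_fn_alt (gold : List (List Int)) (pred : List (List Int)) : Int :=
  let predWords : PySem.Set Int :=
    pred.foldl (fun s span => PySem.Set.update s span) PySem.Set.empty
  gold.foldl (fun fns p => if PySem.Set.isdisjoint predWords p then fns + 1 else fns) 0

-- ===== PRECONDITION & SPEC =====
def Spec_binary_fn (gold : List (List Int)) (pred : List (List Int)) (out : Int) : Prop := out = binary_fn_alt gold pred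
instance (gold : List (List Int)) (pred : List (List Int)) (out : Int) : Decidable (Spec_binary_fn gold pred out) := by unfold Spec_binary_fn; infer_instance

-- ===== CLAIM (what is proved, stated in full; the proofs are below) =====
def Claim_equal_binary_fn : Prop := ∀ (gold : List (List Int)) (pred : List (List Int)), Dom_binary_fn gold pred → Spec_binary_fn gold pred (binary_fn gold pred)

-- ===== LEMMAS AND PROOFS =====

-- A's innermost loop over pred: the flag ends false iff it started false or some span contains word.
theorem foldl_span_flag (pred : List (List Int)) (word : Int) (fn0 : Bool) :
    pred.foldl (fun fn span => if word ∈ span then false else fn) fn0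
      = (fn0 && decide (∀ sp ∈ pred, word ∉ sp)) := by
  induction pred generalizing fn0 with
  | nil => simp
  | cons sp rest ih =>
    simp only [List.foldl_cons, ih]
    by_cases h : word ∈ sp <;> simp [h]

-- A's middle loop over the words of a gold span.
theorem foldl_word_flag (pred : List (List Int)) (p : List Int) (fn0 : Bool) :
    p.foldl (fun fn word =>
        pred.foldl (fun fn span => if word ∈ span then false else fn) fn) fn0
      = (fn0 && decide (∀ w ∈ p, ∀ sp ∈ pred, w ∉ sp)) := by
  induction p generalizing fn0 with
  | nil => simp
  | cons w rest ih =>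
    rw [List.foldl_cons, foldl_span_flag, ih]
    simp [Bool.and_assoc]

-- Membership in the accumulated word set of B.
theorem mem_foldl_update (pred : List (List Int)) (s0 : PySem.Set Int) (w : Int) :
    w ∈ pred.foldl (fun s span => PySem.Set.update s span) s0
      ↔ w ∈ s0 ∨ ∃ sp ∈ pred, w ∈ sp := by
  induction pred generalizing s0 with
  | nil => simp
  | cons sp rest ih =>
    simp only [List.foldl_cons, ih, PySem.Set.mem_update]
    constructor
    · rintro ((h | h) | ⟨x, hx, hw⟩)
      · exact Or.inl h
      · exact Or.inr ⟨sp, by simp, h⟩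
      · exact Or.inr ⟨x, by simp [hx], hw⟩
    · rintro (h | ⟨x, hx, hw⟩)
      · exact Or.inl (Or.inl h)
      · rcases List.mem_cons.mp hx with rfl | hx
        · exact Or.inl (Or.inr hw)
        · exact Or.inr ⟨x, hx, hw⟩

-- The two per-span conditions coincide.
theorem cond_eq (pred : List (List Int)) (p : List Int) :
    PySem.Set.isdisjoint
        (pred.foldl (fun s span => PySem.Set.update s span) PySem.Set.empty) p
      = decide (∀ w ∈ p, ∀ sp ∈ pred, w ∉ sp) := by
  rcases Bool.eq_false_or_eq_true (PySem.Set.isdisjoint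
      (pred.foldl (fun s span => PySem.Set.update s span) PySem.Set.empty) p) with h | h <;>
    rw [h]
  · symm
    rw [decide_eq_true_iff]
    rw [PySem.Set.isdisjoint_iff] at h
    intro w hw sp hsp hwsp
    exact h w ((mem_foldl_update pred PySem.Set.empty w).mpr (Or.inr ⟨sp, hsp, hwsp⟩)) hw
  · symm
    rw [decide_eq_false_iff_not]
    intro hall
    have hne : ¬ ∀ x ∈ (pred.foldl (fun s span => PySem.Set.update s span) PySem.Set.empty), x ∉ p := by
      intro hd
      have : (List.foldl (fun s span => PySem.Set.update s span) PySem.Set.empty pred).isdisjoint p = true := by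
        rw [PySem.Set.isdisjoint_iff]; exact hd
      rw [h] at this; exact Bool.false_ne_true this
    push Not at hne
    rcases hne with ⟨x, hx, hxp⟩
    rw [mem_foldl_update] at hx
    rcases hx with hx | ⟨sp, hsp, hxsp⟩
    · simp [PySem.Set.empty] at hx
    · exact hall x hxp sp hsp hxsp

-- ===== VERDICT (by name: the statement is the Claim_ definition above) =====
theorem binary_fn_spec : Claim_equal_binary_fn := by
  intro gold pred _
  unfold Spec_binary_fn binary_fn binary_fn_alt
  have : (fun (fns : Int) (p : List Int) =>
      let fn : Bool := p.foldl (fun fn word =>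
        pred.foldl (fun fn span => if word ∈ span then false else fn) fn) true
      if fn then fns + 1 else fns)
    = (fun (fns : Int) (p : List Int) =>
      if PySem.Set.isdisjoint
          (pred.foldl (fun s span => PySem.Set.update s span) PySem.Set.empty) p
        then fns + 1 else fns) := by
    funext fns p
    simp only [foldl_word_flag, cond_eq, Bool.true_and]
  rw [this]
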